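-- pv_equiv track=rewrite | github.com/avahajr/ui-midterm | main/server.py | format_days_of_week
-- ===== SOURCE A (Python) =====
-- def format_days_of_week(day_list):
--     if not day_list:
--         return "No days provided"
--
--     plural_days = [day + "s" for day in day_list]
--
--     if len(plural_days) == 1:
--         return plural_days[0]
--
--     formatted_days = ", ".join(plural_days[:-1])
--     formatted_days += f" and {plural_days[-1]}"
--
--     return formatted_days
-- ===== SOURCE B (Python) =====
-- def format_days_of_week(day_list):
--     if not day_list:
--         return "No days provided"
--
--     days = list(day_list)
--     pieces = [days.pop() + "s"]
--     if days:
--         pieces.append(" and ")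
--         pieces.append(days.pop() + "s")
--     while days:
--         pieces.append(", ")
--         pieces.append(days.pop() + "s")
--     return "".join(reversed(pieces))
-- ===== Notes on version B (the rewrite author's own statement) =====
-- stated objective: alternative
-- what changed: Replaces A's slice-the-list / comma-join / append-last decomposition with an iterative back-to-front build: pop days off a stack, emit each piece with the right separator (' and ' for the last gap, ', ' otherwise), and join the reversed pieces once.
import Mathlib
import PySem

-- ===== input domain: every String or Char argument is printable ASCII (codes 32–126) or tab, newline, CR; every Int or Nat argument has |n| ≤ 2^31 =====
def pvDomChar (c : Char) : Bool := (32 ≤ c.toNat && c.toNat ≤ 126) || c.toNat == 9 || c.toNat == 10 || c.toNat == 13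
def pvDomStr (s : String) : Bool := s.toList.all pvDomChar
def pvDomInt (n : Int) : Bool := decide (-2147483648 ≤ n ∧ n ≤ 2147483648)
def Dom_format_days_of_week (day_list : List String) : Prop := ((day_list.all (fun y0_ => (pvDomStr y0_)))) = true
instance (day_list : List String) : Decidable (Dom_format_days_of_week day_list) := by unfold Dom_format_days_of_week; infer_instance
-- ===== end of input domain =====

-- B replaces A's slice-then-join-then-append decomposition with an iterative back-to-front
-- build: pop days off a stack, emit each with the right separator, join the reversed pieces; objective: alternative.

-- ===== PORT A =====
def format_days_of_week (day_list : List String) : String :=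
  if day_list = [] then "No days provided"
  else
    let plural_days := day_list.map (fun day => day ++ "s")
    if plural_days.length = 1 then (PySem.List.pyGet? plural_days 0).getD ""
    else
      let formatted_days := PySem.Str.join ", " (PySem.List.slice plural_days none (some (-1)))
      formatted_days ++ " and " ++ (PySem.List.pyGet? plural_days (-1)).getD ""

-- ===== PORT B =====
-- Source B's 'while days: pieces.append(", "); pieces.append(days.pop() + "s")' loop;
-- the pop-from-the-end stack is modelled as the reversed list, so popping is taking the head.
def fdLoop : List String → List String → List String
  | [], pieces => pieces
  | d :: days, pieces => fdLoop days (pieces ++ [", ", d ++ "s"])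

def format_days_of_week_alt (day_list : List String) : String :=
  if day_list = [] then "No days provided"
  else
    match day_list.reverse with
    | [] => ""   -- unreachable: day_list ≠ []
    | last :: days =>
      let pieces := [last ++ "s"]                              -- pieces = [days.pop() + "s"]
      match days with
      | [] => PySem.Str.join "" pieces.reverse
      | prev :: days2 =>                                       -- if days: append " and ", days.pop() + "s"
        PySem.Str.join "" (fdLoop days2 (pieces ++ [" and ", prev ++ "s"])).reverse

-- ===== PRECONDITION & SPEC =====
def Spec_format_days_of_week (day_list : List String) (out : String) : Prop := out = format_days_of_week_alt day_list
instance (day_list : List String) (out : String) : Decidable (Spec_format_days_of_week day_list out) := by unfold Spec_format_days_of_week; infer_instance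

-- ===== CLAIM (what is proved, stated in full; the proofs are below) =====
def Claim_equal_format_days_of_week : Prop := ∀ (day_list : List String), Dom_format_days_of_week day_list → Spec_format_days_of_week day_list (format_days_of_week day_list)

-- ===== LEMMAS AND PROOFS =====

-- proof-side characterisation of both programs on lists of length ≥ 2, by front recursion
def fdGo : List String → String
  | [] => ""
  | [d] => d ++ "s"
  | [d1, d2] => d1 ++ "s and " ++ d2 ++ "s"
  | d :: rest => d ++ "s, " ++ fdGo rest

-- A's else-branch equals fdGo
lemma fdGo_eq : ∀ (rest : List String) (d e : String),
    PySem.Str.join ", " (((d ++ "s") :: (e ++ "s") :: rest.map (fun day => day ++ "s")).dropLast) ++ " and " ++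
      ((((d ++ "s") :: (e ++ "s") :: rest.map (fun day => day ++ "s")).getLast?).getD "")
    = fdGo (d::e::rest) := by
  intro rest
  induction rest with
  | nil =>
      intro d e
      apply String.toList_inj.mp
      simp [fdGo, PySem.Str.toList_join, PySem.Chars.join, List.intercalate]
  | cons r rs ih =>
      intro d e
      apply String.toList_inj.mp
      have h := congrArg String.toList (ih e r)
      simp [PySem.Str.toList_join, PySem.Chars.join, List.intercalate, fdGo] at h ⊢
      simp [← h]

lemma flatten_intersperse_nil {α : Type} (l : List (List α)) :
    (List.intersperse ([] : List α) l).flatten = l.flatten := by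
  induction l with
  | nil => rfl
  | cons x xs ih => cases xs <;> simp_all [List.intersperse]

lemma fdLoop_append (xs : List String) (a : String) (ps : List String) :
    fdLoop (xs ++ [a]) ps = fdLoop xs ps ++ [", ", a ++ "s"] := by
  induction xs generalizing ps with
  | nil => rfl
  | cons x t ih => simpa [fdLoop] using ih (ps ++ [", ", x ++ "s"])

-- B's loop, run on the reversed middle, equals fdGo of the whole list
lemma fdGo_eq_fdLoop : ∀ (mid : List String) (p q : String),
    fdGo (mid ++ [p, q]) = PySem.Str.join "" (fdLoop mid.reverse ([q ++ "s"] ++ [" and ", p ++ "s"])).reverse := by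
  intro mid
  induction mid with
  | nil =>
      intro p q
      apply String.toList_inj.mp
      simp [fdGo, fdLoop, PySem.Str.toList_join, PySem.Chars.join, List.intercalate]
  | cons a t ih =>
      intro p q
      obtain ⟨b, c, l, hshape⟩ : ∃ b c l, t ++ [p, q] = b :: c :: l := by
        match h : t ++ [p, q] with
        | [] => exact absurd (congrArg List.length h) (by simp)
        | [_] => exact absurd (congrArg List.length h) (by simp)
        | b :: c :: l => exact ⟨b, c, l, rfl⟩
      have hgo : fdGo (a :: (t ++ [p, q])) = a ++ "s, " ++ fdGo (t ++ [p, q]) := by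
        rw [hshape]; rfl
      rw [List.cons_append, hgo, ih p q, List.reverse_cons, fdLoop_append]
      apply String.toList_inj.mp
      simp [PySem.Str.toList_join, PySem.Chars.join, List.intercalate, flatten_intersperse_nil]

-- ===== VERDICT (by name: the statement is the Claim_ definition above) =====
theorem format_days_of_week_spec : Claim_equal_format_days_of_week := by
  intro day_list _
  unfold Spec_format_days_of_week format_days_of_week format_days_of_week_alt
  match day_list with
  | [] => rfl
  | [d] =>
      apply String.toList_inj.mp
      simp [PySem.List.pyGet?, PySem.List.pyIdx?, PySem.Str.toList_join, PySem.Chars.join,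
        List.intercalate]
  | d :: e :: rest =>
      simp only [if_neg (by simp : ¬ (d :: e :: rest = [])), List.map_cons]
      rw [if_neg (by simp), PySem.List.slice_to_neg_one, PySem.List.pyGet?_neg_one, fdGo_eq]
      -- name the reversed list's first two elements
      have hrev : ∃ q p rs, (d :: e :: rest).reverse = q :: p :: rs := by
        match h : (d :: e :: rest).reverse with
        | [] => exact absurd (congrArg List.length h) (by simp)
        | [q] => exact absurd (congrArg List.length h) (by simp)
        | q :: p :: rs => exact ⟨q, p, rs, rfl⟩
      obtain ⟨q, p, rs, h⟩ := hrev
      have hl : d :: e :: rest = rs.reverse ++ [p, q] := by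
        have := congrArg List.reverse h
        simpa using this
      rw [h, hl, fdGo_eq_fdLoop, List.reverse_reverse]
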